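-- pv_equiv track=rewrite | github.com/foxfootsix-123/proj3code-docker | micro/flask_app/globalkeep.py | GLOBALKEEP_TrimString
-- ===== SOURCE A (Python) =====
-- def GLOBALKEEP_TrimString(strInString):
--     strOutString=""
--     nCount=len(strInString)
--     nLoop=0
--     while(nLoop<nCount):
--         strChar=strInString[nLoop:nLoop+1]
--         if((strChar>="A") and (strChar<="Z")):
--             strOutString=strOutString+strChar
--         if((strChar>="a") and (strChar<="z")):
--             strOutString=strOutString+strChar
--         if((strChar>="0") and (strChar<="9")):
--             strOutString=strOutString+strChar
--         if(strChar==" "):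
--             strOutString=strOutString+strChar
--         nLoop=nLoop+1
--     return strOutString#
-- ===== SOURCE B (Python) =====
-- import re
--
-- _KEEP = re.compile(r'[^A-Za-z0-9 ]')
--
-- def GLOBALKEEP_TrimString(strInString):
--     return _KEEP.sub('', strInString)
-- ===== Notes on version B (the rewrite author's own statement) =====
-- stated objective: idiomatic
-- what changed: Replaces the manual index-based while loop with slicing and quadratic string concatenation by a single precompiled regex substitution deleting every character outside [A-Za-z0-9 ].
import Mathlib
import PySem

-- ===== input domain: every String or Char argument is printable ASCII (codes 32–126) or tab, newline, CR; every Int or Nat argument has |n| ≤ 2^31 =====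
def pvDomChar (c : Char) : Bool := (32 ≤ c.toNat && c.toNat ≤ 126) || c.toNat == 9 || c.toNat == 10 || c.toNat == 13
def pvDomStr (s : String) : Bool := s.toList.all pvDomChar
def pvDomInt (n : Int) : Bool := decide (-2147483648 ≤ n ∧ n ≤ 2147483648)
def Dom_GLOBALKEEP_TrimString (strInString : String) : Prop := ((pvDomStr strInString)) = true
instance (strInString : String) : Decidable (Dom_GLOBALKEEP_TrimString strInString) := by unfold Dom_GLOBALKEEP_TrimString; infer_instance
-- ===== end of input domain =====

-- ===== PORT A =====
-- B replaces A's index-based while loop (with quadratic string concatenation) by a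
-- single regex substitution deleting every char outside [A-Za-z0-9 ]; return value only.
-- A's loop: walk the string by index; strInString[nLoop:nLoop+1] is one char on every
-- iteration (nLoop < len), and Python's lexicographic ≤ on one-char strings is the
-- char-code comparison, so the four sequential ifs are ported as char-code range tests.
def pvTrimLoopA : List Char → String → String
  | [], acc => acc
  | c :: rest, acc =>
    let acc := if 'A' ≤ c ∧ c ≤ 'Z' then acc ++ String.ofList [c] else acc
    let acc := if 'a' ≤ c ∧ c ≤ 'z' then acc ++ String.ofList [c] else acc
    let acc := if '0' ≤ c ∧ c ≤ '9' then acc ++ String.ofList [c] else acc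
    let acc := if c = ' ' then acc ++ String.ofList [c] else acc
    pvTrimLoopA rest acc

def GLOBALKEEP_TrimString (strInString : String) : String :=
  pvTrimLoopA strInString.toList ""

-- ===== PORT B =====
-- Source B: re.sub(r'[^A-Za-z0-9 ]', '', s) — i.e. keep exactly the chars matching the
-- explicit ASCII class [A-Za-z0-9 ], in order: a filter by that character class.
def pvKeepClass (c : Char) : Bool :=
  ('A' ≤ c && c ≤ 'Z') || ('a' ≤ c && c ≤ 'z') || ('0' ≤ c && c ≤ '9') || c == ' '

def GLOBALKEEP_TrimString_alt (strInString : String) : String :=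
  String.ofList (strInString.toList.filter pvKeepClass)

-- ===== PRECONDITION & SPEC =====
def Spec_GLOBALKEEP_TrimString (strInString : String) (out : String) : Prop := out = GLOBALKEEP_TrimString_alt strInString
instance (strInString : String) (out : String) : Decidable (Spec_GLOBALKEEP_TrimString strInString out) := by unfold Spec_GLOBALKEEP_TrimString; infer_instance

-- ===== CLAIM (what is proved, stated in full; the proofs are below) =====
def Claim_equal_GLOBALKEEP_TrimString : Prop := ∀ (strInString : String), Dom_GLOBALKEEP_TrimString strInString → Spec_GLOBALKEEP_TrimString strInString (GLOBALKEEP_TrimString strInString)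

-- ===== LEMMAS AND PROOFS =====
theorem pvTrimLoopA_step (c : Char) (rest : List Char) (acc : String) :
    pvTrimLoopA (c :: rest) acc =
      pvTrimLoopA rest (acc ++ (if pvKeepClass c then String.ofList [c] else "")) := by
  simp only [pvTrimLoopA, pvKeepClass]
  split_ifs <;> simp_all [Char.le_def, Char.ext_iff, UInt32.le_iff_toNat_le, UInt32.ext_iff] <;> omega

theorem pvTrimLoopA_eq (l : List Char) : ∀ acc : String,
    pvTrimLoopA l acc = acc ++ String.ofList (l.filter pvKeepClass) := by
  induction l with
  | nil => intro acc; simp [pvTrimLoopA]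
  | cons c rest ih =>
    intro acc
    rw [pvTrimLoopA_step, ih]
    by_cases h : pvKeepClass c <;> (apply String.toList_inj.mp; simp [h])

-- ===== VERDICT (by name: the statement is the Claim_ definition above) =====
theorem GLOBALKEEP_TrimString_spec : Claim_equal_GLOBALKEEP_TrimString := by
  intro s _
  unfold Spec_GLOBALKEEP_TrimString GLOBALKEEP_TrimString GLOBALKEEP_TrimString_alt
  rw [pvTrimLoopA_eq]
  simp
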